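-- pv_equiv track=rewrite | github.com/grigorevmp/DiffrentProjects2 | Networks/heming/task1.py | returnControlBits
-- ===== SOURCE A (Python) =====
-- def returnControlBits(code_word, control_bits_num):
--     """
--     Control bit is XOR of N bit through N starting with N bit
--     :param code_word:
--     :param control_bits_num:
--     :return:
--     """
--     code_word_array = []
--     for a in code_word:
--         code_word_array.append(int(a))
--     sub_code_word_array = []
--     for i in range(control_bits_num):
--         sub_code_word_array.append([])
--         k = 0
--         copy_this_element = True
--         # from N bit to the end
--         for j in range(2 ** i - 1, len(code_word_array)):
--             if copy_this_element:
--                 sub_code_word_array[i].append(code_word_array[j])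
--             k += 1
--             k = k % (2 ** (i + 1))
--             if k == (2 ** i) or k == 0:
--                 copy_this_element = not copy_this_element
--     return sub_code_word_array
-- ===== SOURCE B (Python) =====
-- def returnControlBits(code_word, control_bits_num):
--     bits = [int(c) for c in code_word]
--     n = len(bits)
--     return [[bits[j] for j in range(n) if ((j + 1) >> i) & 1]
--             for i in range(control_bits_num)]
-- ===== Notes on version B (the rewrite author's own statement) =====
-- stated objective: simpler
-- what changed: Replaces the stateful inner scan (running counter k modulo 2^(i+1) toggling a copy_this_element flag) with a direct closed-form bit test: position j belongs to control group i iff ((j+1)>>i)&1 is set, collected by a comprehension.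
import Mathlib
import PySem

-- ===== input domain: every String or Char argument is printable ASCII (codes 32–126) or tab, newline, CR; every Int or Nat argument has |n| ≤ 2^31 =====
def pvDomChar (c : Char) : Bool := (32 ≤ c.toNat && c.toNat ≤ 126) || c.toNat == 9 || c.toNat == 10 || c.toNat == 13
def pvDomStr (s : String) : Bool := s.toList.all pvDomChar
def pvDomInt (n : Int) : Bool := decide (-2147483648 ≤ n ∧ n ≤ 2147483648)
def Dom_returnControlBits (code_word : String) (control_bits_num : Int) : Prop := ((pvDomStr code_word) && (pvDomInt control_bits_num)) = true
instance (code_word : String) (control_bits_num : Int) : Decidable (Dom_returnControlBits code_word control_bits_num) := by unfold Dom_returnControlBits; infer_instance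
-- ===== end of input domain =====

-- B replaces A's stateful inner scan (counter k mod 2^(i+1) toggling a copy flag) by a direct
-- closed-form bit test ((j+1)>>i)&1 selecting the members of control group i; objective: simpler.

-- ===== PORT A =====
-- inner loop body of A: state (sub_code_word_array[i], k, copy_this_element)
def rcbStep (bits : List Int) (i : Nat) (st : List Int × Nat × Bool) (j : Nat) : List Int × Nat × Bool :=
  let sub := if st.2.2 then st.1 ++ [bits.getD j 0] else st.1
  let k := (st.2.1 + 1) % (2 ^ (i + 1))
  let copy := if k = 2 ^ i ∨ k = 0 then !st.2.2 else st.2.2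
  (sub, k, copy)

def returnControlBits (code_word : String) (control_bits_num : Int) : List (List Int) :=
  -- int(a): exact for a single digit character (guaranteed by Pre_)
  let arr := code_word.toList.map (fun c => ((c.toNat : Int) - 48))
  (List.range control_bits_num.toNat).foldl (fun acc i =>
    acc ++ [((List.range' (2 ^ i - 1) (arr.length - (2 ^ i - 1))).foldl (rcbStep arr i)
              ([], 0, true)).1]) []

-- ===== PORT B =====
def returnControlBits_alt (code_word : String) (control_bits_num : Int) : List (List Int) :=
  let bits := code_word.toList.map (fun c => ((c.toNat : Int) - 48))
  let n := bits.length
  (List.range control_bits_num.toNat).map (fun i =>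
    ((List.range n).filter (fun j => ((j + 1) >>> i) &&& 1 == 1)).map (fun j => bits.getD j 0))

-- ===== PRECONDITION & SPEC =====
-- Pre_ excludes exactly the strings containing a non-digit character, on which A's int(a) raises ValueError.
def Pre_returnControlBits (code_word : String) (control_bits_num : Int) : Prop :=
  code_word.toList.all (fun c => c.isDigit) = true
instance (code_word : String) (control_bits_num : Int) : Decidable (Pre_returnControlBits code_word control_bits_num) := by unfold Pre_returnControlBits; infer_instance

def pvWitness_returnControlBits : String × Int := ("0110101", 3)

def Spec_returnControlBits (code_word : String) (control_bits_num : Int) (out : List (List Int)) : Prop := out = returnControlBits_alt code_word control_bits_num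
instance (code_word : String) (control_bits_num : Int) (out : List (List Int)) : Decidable (Spec_returnControlBits code_word control_bits_num out) := by unfold Spec_returnControlBits; infer_instance

-- ===== CLAIM (what is proved, stated in full; the proofs are below) =====
def Claim_equal_returnControlBits : Prop := ∀ (code_word : String) (control_bits_num : Int), Dom_returnControlBits code_word control_bits_num → Pre_returnControlBits code_word control_bits_num → Spec_returnControlBits code_word control_bits_num (returnControlBits code_word control_bits_num)

-- ===== LEMMAS AND PROOFS =====

-- membership predicate of control group i
def rcbPred (i : Nat) : Nat → Bool := fun j => ((j + 1) >>> i) &&& 1 == 1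

lemma rcb_mod_two_pow (m t : Nat) (hm : 0 < m) :
    ((t + 1) % (2 * m) = m ∨ (t + 1) % (2 * m) = 0) ↔ (t + 1) % m = 0 := by
  have hmod : (t + 1) % (2 * m) % m = (t + 1) % m :=
    Nat.mod_mod_of_dvd _ ⟨2, by ring⟩
  constructor
  · rintro (h | h) <;> rw [← hmod, h] <;> simp
  · intro h
    have hdvd : m ∣ (t + 1) % (2 * m) := by
      rw [Nat.dvd_iff_mod_eq_zero, hmod]; exact h
    obtain ⟨d, hd⟩ := hdvd
    have hlt : (t + 1) % (2 * m) < 2 * m := Nat.mod_lt _ (by omega)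
    have hdlt : d < 2 := by
      by_contra hcon
      have hc : 2 ≤ d := Nat.le_of_not_lt hcon
      have : 2 * m ≤ m * d := by calc 2 * m = m * 2 := by ring
                                    _ ≤ m * d := Nat.mul_le_mul_left m hc
      omega
    interval_cases d
    · right; omega
    · left; omega

lemma rcb_pred_eq (i t : Nat) :
    rcbPred i (2 ^ i - 1 + t) = decide ((t / 2 ^ i) % 2 = 0) := by
  have hp : 0 < 2 ^ i := Nat.two_pow_pos i
  have h1 : 2 ^ i - 1 + t + 1 = t + 2 ^ i := by omega
  unfold rcbPred
  rw [h1, Nat.shiftRight_eq_div_pow, Nat.add_div_right _ hp, Nat.and_one_is_mod]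
  rcases Nat.mod_two_eq_zero_or_one (t / 2 ^ i) with h | h <;>
    simp [Nat.add_mod, h]

lemma rcb_copy_step (i t : Nat) :
    (if (t + 1) % 2 ^ (i + 1) = 2 ^ i ∨ (t + 1) % 2 ^ (i + 1) = 0
       then !decide ((t / 2 ^ i) % 2 = 0) else decide ((t / 2 ^ i) % 2 = 0))
    = decide (((t + 1) / 2 ^ i) % 2 = 0) := by
  have hp : 0 < 2 ^ i := Nat.two_pow_pos i
  have h2 : (2 : Nat) ^ (i + 1) = 2 * 2 ^ i := by rw [pow_succ]; ring
  have hdiv : (t + 1) / 2 ^ i = t / 2 ^ i + if 2 ^ i ∣ t + 1 then 1 else 0 :=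
    Nat.succ_div
  by_cases h : (t + 1) % 2 ^ i = 0
  · have hcond : (t + 1) % 2 ^ (i + 1) = 2 ^ i ∨ (t + 1) % 2 ^ (i + 1) = 0 := by
      rw [h2]; exact (rcb_mod_two_pow (2 ^ i) t hp).mpr h
    rw [if_pos hcond]
    have : (t + 1) / 2 ^ i = t / 2 ^ i + 1 := by
      rw [hdiv, if_pos (Nat.dvd_of_mod_eq_zero h)]
    rw [this, ← decide_not, decide_eq_decide]
    omega
  · have hcond : ¬((t + 1) % 2 ^ (i + 1) = 2 ^ i ∨ (t + 1) % 2 ^ (i + 1) = 0) := by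
      rw [h2]; intro hc; exact h ((rcb_mod_two_pow (2 ^ i) t hp).mp hc)
    rw [if_neg hcond]
    have hnd : ¬ 2 ^ i ∣ t + 1 := by
      rw [Nat.dvd_iff_mod_eq_zero]; exact h
    rw [hdiv, if_neg hnd]
    simp
  
lemma rcb_inner (bits : List Int) (i : Nat) :
    ∀ (c t : Nat) (sub : List Int),
      ((List.range' (2 ^ i - 1 + t) c).foldl (rcbStep bits i)
        (sub, t % 2 ^ (i + 1), decide ((t / 2 ^ i) % 2 = 0))).1
      = sub ++ ((List.range' (2 ^ i - 1 + t) c).filter (rcbPred i)).map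
          (fun j => bits.getD j 0) := by
  intro c
  induction c with
  | zero => intro t sub; simp
  | succ c ih =>
    intro t sub
    rw [List.range'_succ, List.foldl_cons, List.filter_cons]
    have hstep : rcbStep bits i (sub, t % 2 ^ (i + 1), decide ((t / 2 ^ i) % 2 = 0))
        (2 ^ i - 1 + t)
        = ((if rcbPred i (2 ^ i - 1 + t) then sub ++ [bits.getD (2 ^ i - 1 + t) 0] else sub),
           (t + 1) % 2 ^ (i + 1), decide (((t + 1) / 2 ^ i) % 2 = 0)) := by
      unfold rcbStep
      rw [rcb_pred_eq]
      simp only [Nat.mod_add_mod]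
      rw [rcb_copy_step]
    rw [hstep]
    have harg : 2 ^ i - 1 + t + 1 = 2 ^ i - 1 + (t + 1) := by omega
    rw [harg, ih (t + 1)]
    by_cases hpred : rcbPred i (2 ^ i - 1 + t) = true
    · rw [if_pos hpred, if_pos hpred]; simp
    · rw [if_neg hpred, if_neg hpred]

lemma rcb_range_filter (i n : Nat) :
    (List.range n).filter (rcbPred i)
    = (List.range' (2 ^ i - 1) (n - (2 ^ i - 1))).filter (rcbPred i) := by
  have hp : 0 < 2 ^ i := Nat.two_pow_pos i
  have hfalse : ∀ j, j + 1 < 2 ^ i → rcbPred i j = false := by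
    intro j hj
    unfold rcbPred
    rw [Nat.shiftRight_eq_div_pow, Nat.div_eq_of_lt hj]
    simp
  by_cases h : 2 ^ i - 1 ≤ n
  · have hsplit : List.range' 0 (2 ^ i - 1) ++ List.range' (0 + (2 ^ i - 1)) (n - (2 ^ i - 1))
        = List.range' 0 ((2 ^ i - 1) + (n - (2 ^ i - 1))) := List.range'_append_1
    simp only [Nat.zero_add] at hsplit
    rw [show (2 ^ i - 1) + (n - (2 ^ i - 1)) = n from by omega] at hsplit
    rw [List.range_eq_range', ← hsplit, List.filter_append]
    have : (List.range' 0 (2 ^ i - 1)).filter (rcbPred i) = [] := by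
      apply List.filter_eq_nil_iff.mpr
      intro j hj
      rw [List.mem_range'_1] at hj
      simp [hfalse j (by omega)]
    rw [this, List.nil_append]
  · have hz : n - (2 ^ i - 1) = 0 := by omega
    rw [hz]
    apply List.filter_eq_nil_iff.mpr
    intro j hj
    rw [List.mem_range] at hj
    simp [hfalse j (by omega)]

-- ===== VERDICT (by name: the statement is the Claim_ definition above) =====
theorem returnControlBits_spec : Claim_equal_returnControlBits := by
  intro code_word control_bits_num _ _
  unfold Spec_returnControlBits returnControlBits returnControlBits_alt
  simp only []
  rw [PySem.List.foldl_append_singleton_eq_map, List.nil_append]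
  apply List.map_congr_left
  intro i _
  have h0 := rcb_inner (code_word.toList.map (fun c => ((c.toNat : Int) - 48))) i
      ((code_word.toList.map (fun c => ((c.toNat : Int) - 48))).length - (2 ^ i - 1)) 0 []
  simp only [Nat.add_zero, Nat.zero_mod, Nat.zero_div, decide_true] at h0
  rw [List.nil_append] at h0
  rw [h0, ← rcb_range_filter i]
  rfl
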